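-- pv_equiv track=rewrite | github.com/kenduest/grafana-utils | python/grafana_utils/access/workflows.py | _merge_team_membership_target
-- ===== SOURCE A (Python) =====
-- def _normalize_access_import_identity(value):
--     """Internal helper for normalize access import identity."""
--     return str(value or "").strip().lower()
--
-- def _normalize_access_identity_list(values):
--     """Internal helper for normalize access identity list."""
--     normalized = []
--     seen = set()
--     for value in values:
--         text = str(value or "").strip()
--         if not text:
--             continue
--         lowered = _normalize_access_import_identity(text)
--         if lowered in seen:
--             continue
--         seen.add(lowered)
--         normalized.append(text)
--     return normalized
--
-- def _merge_team_membership_target(members, admins):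
--     """Internal helper for merge team membership target."""
--     desired_members = _normalize_access_identity_list(members)
--     desired_admins = _normalize_access_identity_list(admins)
--     desired_all_identities = []
--     seen = set()
--     for identity in desired_members + desired_admins:
--         key = _normalize_access_import_identity(identity)
--         if key in seen:
--             continue
--         seen.add(key)
--         desired_all_identities.append(identity)
--     return desired_all_identities, desired_members, desired_admins
-- ===== SOURCE B (Python) =====
-- def _key(value):
--     return str(value or "").strip().lower()
--
--
-- def _clean(values):
--     return [t for t in (str(v or "").strip() for v in values) if t]
--
--
-- def _dedupe(texts):
--     # repeated-filter nub: take the first pending text, then drop every later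
--     # text sharing its key from the pending list -- no running seen-set
--     out = []
--     pending = list(texts)
--     while pending:
--         head = pending[0]
--         out.append(head)
--         hk = _key(head)
--         pending = [t for t in pending[1:] if _key(t) != hk]
--     return out
--
--
-- def _merge_team_membership_target(members, admins):
--     mt = _clean(members)
--     at = _clean(admins)
--     return _dedupe(mt + at), _dedupe(mt), _dedupe(at)
-- ===== Notes on version B (the rewrite author's own statement) =====
-- stated objective: alternative
-- what changed: A's loops that each thread a (result list, seen-set) accumulator pair are replaced by a classic repeated-filter nub with no seen structure at all (emit the first pending text, filter its key's duplicates out of the pending tail, repeat), and the merged list is deduped directly from the concatenation of the two cleaned lists instead of merging the two already-deduped lists under a fresh seen-set.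
import Mathlib
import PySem

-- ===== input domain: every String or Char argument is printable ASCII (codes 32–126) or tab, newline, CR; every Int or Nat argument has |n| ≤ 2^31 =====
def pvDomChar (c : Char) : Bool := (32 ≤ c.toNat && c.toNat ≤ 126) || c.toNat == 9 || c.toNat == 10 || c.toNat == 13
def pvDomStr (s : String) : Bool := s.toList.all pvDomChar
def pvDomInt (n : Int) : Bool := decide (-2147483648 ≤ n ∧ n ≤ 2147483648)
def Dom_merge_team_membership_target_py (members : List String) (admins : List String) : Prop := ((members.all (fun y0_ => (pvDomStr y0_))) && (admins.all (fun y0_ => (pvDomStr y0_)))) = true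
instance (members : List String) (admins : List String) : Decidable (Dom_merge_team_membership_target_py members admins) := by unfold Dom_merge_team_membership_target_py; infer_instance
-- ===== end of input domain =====

set_option maxHeartbeats 1000000


-- B replaces A's (result list, seen-set) accumulator loops by a repeated-filter nub (emit the
-- first pending text, filter its key's duplicates out of the pending tail, repeat) applied to the
-- cleaned member list, the cleaned admin list and their raw concatenation (objective: alternative).

-- ===== PORT A =====
-- str(value or "") for a string argument: "" stays "", anything else is itself
def pvOrEmpty (value : String) : String := if value = "" then "" else value

def normalize_access_import_identity_py (value : String) : String :=
  PySem.Str.lower (PySem.Str.strip (pvOrEmpty value))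

-- the body of A's loop in _normalize_access_identity_list (state: normalized, seen)
def pvStepA (st : List String × PySem.Set String) (value : String) : List String × PySem.Set String :=
  let text := PySem.Str.strip (pvOrEmpty value)
  if text = "" then st
  else
    let lowered := normalize_access_import_identity_py text
    if PySem.Set.contains st.2 lowered then st
    else (st.1 ++ [text], PySem.Set.add st.2 lowered)

def normalize_access_identity_list_py (values : List String) : List String :=
  (values.foldl pvStepA ([], PySem.Set.empty)).1

-- the body of A's merge loop (state: desired_all_identities, seen)
def pvStepMerge (st : List String × PySem.Set String) (identity : String) : List String × PySem.Set String :=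
  let key := normalize_access_import_identity_py identity
  if PySem.Set.contains st.2 key then st
  else (st.1 ++ [identity], PySem.Set.add st.2 key)

def merge_team_membership_target_py (members : List String) (admins : List String) :
    List String × List String × List String :=
  let desired_members := normalize_access_identity_list_py members
  let desired_admins := normalize_access_identity_list_py admins
  let desired_all_identities :=
    ((desired_members ++ desired_admins).foldl pvStepMerge ([], PySem.Set.empty)).1
  (desired_all_identities, desired_members, desired_admins)

-- ===== PORT B =====
-- Source B _key
def keyB (value : String) : String :=
  PySem.Str.lower (PySem.Str.strip (if value = "" then "" else value))

-- Source B _clean: strip everything, drop empties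
def cleanB (values : List String) : List String :=
  (values.map (fun v => PySem.Str.strip (if v = "" then "" else v))).filter (fun t => !(t == ""))

-- Source B _dedupe: the while loop over the pending list as the obvious structural recursion —
-- emit the head, drop its key's duplicates from the pending tail, continue
def dedupeB : List String → List String
  | [] => []
  | head :: rest => head :: dedupeB (rest.filter (fun t => !(keyB t == keyB head)))
termination_by ts => ts.length
decreasing_by
  simp only [List.length_unattach]
  exact Nat.lt_succ_of_le (le_trans (List.length_filter_le _ _) (by simp))

def merge_team_membership_target_py_alt (members : List String) (admins : List String) :
    List String × List String × List String :=
  let mt := cleanB members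
  let at_ := cleanB admins
  (dedupeB (mt ++ at_), dedupeB mt, dedupeB at_)

-- ===== PRECONDITION & SPEC =====
def Spec_merge_team_membership_target_py (members : List String) (admins : List String) (out : List String × List String × List String) : Prop := out = merge_team_membership_target_py_alt members admins
instance (members : List String) (admins : List String) (out : List String × List String × List String) : Decidable (Spec_merge_team_membership_target_py members admins out) := by unfold Spec_merge_team_membership_target_py; infer_instance

-- ===== CLAIM (what is proved, stated in full; the proofs are below) =====
def Claim_equal_merge_team_membership_target_py : Prop := ∀ (members : List String) (admins : List String), Dom_merge_team_membership_target_py members admins → Spec_merge_team_membership_target_py members admins (merge_team_membership_target_py members admins)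

-- ===== LEMMAS AND PROOFS =====

theorem contains_add (s : PySem.Set String) (x y : String) :
    PySem.Set.contains (PySem.Set.add s x) y = (PySem.Set.contains s y || y == x) := by
  by_cases h : y = x <;> by_cases h2 : y ∈ s <;>
    simp [PySem.Set.contains, PySem.Set.mem_add, h, h2]

-- A's normalization helper is B's key function
theorem keyA_eq_keyB (v : String) : normalize_access_import_identity_py v = keyB v := rfl

-- the two branches of A's merge-loop body, phrased through set membership
theorem stepMerge_mem (st : List String × PySem.Set String) (t : String)
    (h : keyB t ∈ st.2) : pvStepMerge st t = st := by
  simp [pvStepMerge, keyA_eq_keyB, PySem.Set.contains, h]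

theorem stepMerge_not_mem (st : List String × PySem.Set String) (t : String)
    (h : keyB t ∉ st.2) :
    pvStepMerge st t = (st.1 ++ [t], PySem.Set.add st.2 (keyB t)) := by
  simp [pvStepMerge, keyA_eq_keyB, PySem.Set.contains, h]

-- A's merge loop over any starting state produces the accumulator followed by the
-- nub dedup of the not-yet-seen elements
theorem fold_merge_fst (ts : List String) :
    ∀ (st : List String × PySem.Set String),
      (ts.foldl pvStepMerge st).1
        = st.1 ++ dedupeB (ts.filter (fun t => !(PySem.Set.contains st.2 (keyB t)))) := by
  induction ts with
  | nil => intro st; simp [dedupeB]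
  | cons t ts ih =>
    intro st
    by_cases hc : keyB t ∈ st.2
    · rw [List.foldl_cons, stepMerge_mem st t hc, ih]
      simp [PySem.Set.contains, hc]
    · rw [List.foldl_cons, stepMerge_not_mem st t hc, ih]
      have hcons : (t :: ts).filter (fun u => !(PySem.Set.contains st.2 (keyB u)))
          = t :: ts.filter (fun u => !(PySem.Set.contains st.2 (keyB u))) := by
        simp [PySem.Set.contains, hc]
      rw [hcons, dedupeB, List.filter_filter]
      have hf : ∀ u ∈ ts,
          (!PySem.Set.contains (PySem.Set.add st.2 (keyB t)) (keyB u))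
            = ((!(keyB u == keyB t)) && !PySem.Set.contains st.2 (keyB u)) := by
        intro u _
        rw [contains_add]
        cases h1 : PySem.Set.contains st.2 (keyB u) <;> cases h2 : (keyB u == keyB t) <;> simp
      rw [List.filter_congr hf]
      simp

-- A's per-list loop, element by element, is A's merge loop over the cleaned texts
theorem foldA_eq_foldMerge (values : List String) :
    ∀ (st : List String × PySem.Set String),
      values.foldl pvStepA st = (cleanB values).foldl pvStepMerge st := by
  induction values with
  | nil => intro st; simp [cleanB]
  | cons v vs ih =>
    intro st
    have hclean : cleanB (v :: vs)
        = if PySem.Str.strip (if v = "" then "" else v) = ""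
          then cleanB vs
          else PySem.Str.strip (if v = "" then "" else v) :: cleanB vs := by
      simp only [cleanB, List.map_cons, List.filter_cons]
      by_cases h : PySem.Str.strip (if v = "" then "" else v) = "" <;> simp [h]
    by_cases h : PySem.Str.strip (if v = "" then "" else v) = ""
    · have hstep : pvStepA st v = st := by
        simp [pvStepA, pvOrEmpty, h]
      rw [List.foldl_cons, hstep, hclean, if_pos h, ih]
    · have hstep : pvStepA st v = pvStepMerge st (PySem.Str.strip (if v = "" then "" else v)) := by
        simp [pvStepA, pvStepMerge, pvOrEmpty, h]
      rw [List.foldl_cons, hstep, hclean, if_neg h, List.foldl_cons, ih]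

theorem mem_of_mem_dedupeB (x : String) :
    ∀ (n : Nat) (l : List String), l.length ≤ n → x ∈ dedupeB l → x ∈ l := by
  intro n
  induction n with
  | zero =>
    intro l hl h
    rcases List.eq_nil_of_length_eq_zero (Nat.le_zero.mp hl) with rfl
    simp [dedupeB] at h
  | succ n ih =>
    intro l hl h
    cases l with
    | nil => simp [dedupeB] at h
    | cons head rest =>
      rw [dedupeB] at h
      rcases List.mem_cons.mp h with h | h
      · simp [h]
      · have hlen : (rest.filter (fun t => !(keyB t == keyB head))).length ≤ n :=
          le_trans (List.length_filter_le _ _) (by simpa using hl)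
        exact List.mem_cons_of_mem _ (List.mem_of_mem_filter (ih _ hlen h))

theorem nodup_keys_dedupeB :
    ∀ (n : Nat) (l : List String), l.length ≤ n → ((dedupeB l).map keyB).Nodup := by
  intro n
  induction n with
  | zero =>
    intro l hl
    rcases List.eq_nil_of_length_eq_zero (Nat.le_zero.mp hl) with rfl
    simp [dedupeB]
  | succ n ih =>
    intro l hl
    cases l with
    | nil => simp [dedupeB]
    | cons head rest =>
      rw [dedupeB, List.map_cons]
      have hlen : (rest.filter (fun t => !(keyB t == keyB head))).length ≤ n :=
        le_trans (List.length_filter_le _ _) (by simpa using hl)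
      refine List.nodup_cons.mpr ⟨?_, ih _ hlen⟩
      intro hmem
      rcases List.mem_map.mp hmem with ⟨y, hy, hky⟩
      have hyf := mem_of_mem_dedupeB y _ _ le_rfl hy
      have := List.of_mem_filter hyf
      simp only [Bool.not_eq_eq_eq_not, Bool.not_true, beq_eq_false_iff_ne] at this
      exact this hky

theorem dedupeB_of_nodup_keys :
    ∀ (l : List String), (l.map keyB).Nodup → dedupeB l = l := by
  intro l
  induction l with
  | nil => simp [dedupeB]
  | cons head rest ih =>
    intro h
    rw [List.map_cons, List.nodup_cons] at h
    have hf : rest.filter (fun t => !(keyB t == keyB head)) = rest := by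
      refine List.filter_eq_self.mpr ?_
      intro a ha
      simp only [Bool.not_eq_eq_eq_not, Bool.not_true, beq_eq_false_iff_ne]
      intro hk
      exact h.1 (hk ▸ List.mem_map_of_mem ha)
    rw [dedupeB, hf, ih h.2]

theorem foldMerge_empty_eq_dedupeB (ts : List String) :
    (ts.foldl pvStepMerge (([], PySem.Set.empty) : List String × PySem.Set String)).1
      = dedupeB ts := by
  rw [fold_merge_fst]
  have h : ts.filter (fun t => !(PySem.Set.contains (PySem.Set.empty : PySem.Set String) (keyB t))) = ts :=
    List.filter_eq_self.mpr (fun a _ => by simp [PySem.Set.contains, PySem.Set.empty])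
  rw [h, List.nil_append]

-- key-membership in a filtered-by-key list
theorem mem_map_keyB_filter_ne (k h : String) (l : List String) :
    k ∈ (l.filter (fun t => !(keyB t == keyB h))).map keyB ↔ k ∈ l.map keyB ∧ k ≠ keyB h := by
  simp only [List.mem_map, List.mem_filter, Bool.not_eq_eq_eq_not, Bool.not_true,
    beq_eq_false_iff_ne]
  constructor
  · rintro ⟨y, ⟨hy, hne⟩, rfl⟩
    exact ⟨⟨y, hy, rfl⟩, hne⟩
  · rintro ⟨⟨y, hy, rfl⟩, hne⟩
    exact ⟨y, ⟨hy, hne⟩, rfl⟩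

-- dedup does not change which keys occur
theorem mem_keys_dedupeB (k : String) :
    ∀ (n : Nat) (l : List String), l.length ≤ n →
      (k ∈ (dedupeB l).map keyB ↔ k ∈ l.map keyB) := by
  intro n
  induction n with
  | zero =>
    intro l hl
    rcases List.eq_nil_of_length_eq_zero (Nat.le_zero.mp hl) with rfl
    simp [dedupeB]
  | succ n ih =>
    intro l hl
    cases l with
    | nil => simp [dedupeB]
    | cons head rest =>
      have hlen : (rest.filter (fun t => !(keyB t == keyB head))).length ≤ n :=
        le_trans (List.length_filter_le _ _) (by simpa using hl)
      rw [dedupeB, List.map_cons, List.map_cons, List.mem_cons, List.mem_cons,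
        ih _ hlen, mem_map_keyB_filter_ne]
      by_cases hk : k = keyB head
      · simp [hk]
      · simp [hk]

-- dedup commutes with a key-based filter
theorem dedupeB_filter_comm (p : String → Bool) (hp : ∀ a b, keyB a = keyB b → p a = p b) :
    ∀ (n : Nat) (l : List String), l.length ≤ n →
      dedupeB (l.filter p) = (dedupeB l).filter p := by
  intro n
  induction n with
  | zero =>
    intro l hl
    rcases List.eq_nil_of_length_eq_zero (Nat.le_zero.mp hl) with rfl
    simp [dedupeB]
  | succ n ih =>
    intro l hl
    cases l with
    | nil => simp [dedupeB]
    | cons head rest =>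
      have hlen : (rest.filter (fun t => !(keyB t == keyB head))).length ≤ n :=
        le_trans (List.length_filter_le _ _) (by simpa using hl)
      cases hph : p head with
      | false =>
        have h1 : (rest.filter p).filter (fun t => !(keyB t == keyB head)) = rest.filter p := by
          refine List.filter_eq_self.mpr ?_
          intro a ha
          simp only [Bool.not_eq_eq_eq_not, Bool.not_true, beq_eq_false_iff_ne]
          intro hk
          have hpa := hp a head hk
          rw [(List.mem_filter.mp ha).2, hph] at hpa
          exact absurd hpa (by decide)
        calc dedupeB ((head :: rest).filter p)
            = dedupeB (rest.filter p) := by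
              rw [List.filter_cons_of_neg (by simp [hph])]
          _ = dedupeB ((rest.filter (fun t => !(keyB t == keyB head))).filter p) := by
              rw [List.filter_comm, h1]
          _ = (dedupeB (rest.filter (fun t => !(keyB t == keyB head)))).filter p := ih _ hlen
          _ = (dedupeB (head :: rest)).filter p := by
              rw [dedupeB, List.filter_cons_of_neg (by simp [hph])]
      | true =>
        rw [List.filter_cons_of_pos (by simp [hph]), dedupeB, dedupeB,
          List.filter_cons_of_pos (by simp [hph])]
        congr 1
        rw [List.filter_comm, ih _ hlen]

-- dedup of a concatenation: dedup the left part, then dedup the right part with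
-- the left part's keys filtered away
theorem dedupeB_append :
    ∀ (n : Nat) (xs ys : List String), xs.length ≤ n →
      dedupeB (xs ++ ys)
        = dedupeB xs ++ dedupeB (ys.filter (fun y => !((xs.map keyB).contains (keyB y)))) := by
  intro n
  induction n with
  | zero =>
    intro xs ys hl
    rcases List.eq_nil_of_length_eq_zero (Nat.le_zero.mp hl) with rfl
    simp [dedupeB]
  | succ n ih =>
    intro xs ys hl
    cases xs with
    | nil => simp [dedupeB]
    | cons head rest =>
      have hlen : (rest.filter (fun t => !(keyB t == keyB head))).length ≤ n :=
        le_trans (List.length_filter_le _ _) (by simpa using hl)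
      rw [List.cons_append, dedupeB, dedupeB, List.filter_append, ih _ _ hlen,
        List.cons_append]
      have harg : (ys.filter (fun t => !(keyB t == keyB head))).filter
            (fun y => !(((rest.filter (fun t => !(keyB t == keyB head))).map keyB).contains (keyB y)))
          = ys.filter (fun y => !(((head :: rest).map keyB).contains (keyB y))) := by
        rw [List.filter_filter]
        apply List.filter_congr
        intro y _
        rw [List.map_cons, List.contains_cons]
        by_cases ha : keyB y = keyB head
        · rw [beq_iff_eq.mpr ha]
          simp
        · have hcb : ((rest.filter (fun t => !(keyB t == keyB head))).map keyB).contains (keyB y)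
              = (rest.map keyB).contains (keyB y) := by
            rw [List.contains_eq_mem, List.contains_eq_mem]
            by_cases hm : keyB y ∈ rest.map keyB
            · simp [hm, (mem_map_keyB_filter_ne _ _ _).mpr ⟨hm, ha⟩]
            · have hnm : keyB y ∉ (rest.filter (fun t => !(keyB t == keyB head))).map keyB :=
                fun hc => hm ((mem_map_keyB_filter_ne _ _ _).mp hc).1
              simp [hm, hnm]
          rw [beq_eq_false_iff_ne.mpr ha, hcb]
          cases hc : (rest.map keyB).contains (keyB y) <;> simp
      rw [harg]

-- idempotence on key-deduped input, packaged
theorem dedupeB_dedupeB (l : List String) : dedupeB (dedupeB l) = dedupeB l :=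
  dedupeB_of_nodup_keys _ (nodup_keys_dedupeB _ _ le_rfl)

-- ===== VERDICT (by name: the statement is the Claim_ definition above) =====
theorem merge_team_membership_target_py_spec : Claim_equal_merge_team_membership_target_py := by
  unfold Claim_equal_merge_team_membership_target_py
  intro members admins _
  unfold Spec_merge_team_membership_target_py
  unfold merge_team_membership_target_py merge_team_membership_target_py_alt
  simp only [normalize_access_identity_list_py, foldA_eq_foldMerge, foldMerge_empty_eq_dedupeB]
  set mt := cleanB members with hmt
  set at_ := cleanB admins with hat
  refine Prod.ext ?_ rfl
  simp only
  -- A's merged list: dedup of (dedupeB mt ++ dedupeB at_)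
  rw [dedupeB_append (dedupeB mt).length _ _ le_rfl,
    dedupeB_append mt.length mt at_ le_rfl, dedupeB_dedupeB]
  congr 1
  -- align the two filters, then collapse dedupeB ∘ filter over the deduped admins
  have hfilters : (dedupeB at_).filter (fun y => !(((dedupeB mt).map keyB).contains (keyB y)))
      = (dedupeB at_).filter (fun y => !((mt.map keyB).contains (keyB y))) := by
    apply List.filter_congr
    intro y _
    have := mem_keys_dedupeB (keyB y) mt.length mt le_rfl
    by_cases h : keyB y ∈ mt.map keyB
    · simp [List.contains_eq_mem, h, this.mpr h]
    · have h2 : keyB y ∉ (dedupeB mt).map keyB := fun hc => h (this.mp hc)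
      simp [List.contains_eq_mem, h, h2]
  have hq : ∀ a b : String, keyB a = keyB b →
      (fun y => !((mt.map keyB).contains (keyB y))) a
        = (fun y => !((mt.map keyB).contains (keyB y))) b := by
    intro a b hab
    simp only [hab]
  rw [hfilters, ← dedupeB_filter_comm _ hq at_.length at_ le_rfl, dedupeB_dedupeB]
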